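-- pv_equiv track=rewrite | github.com/thiago-franco/uri | 1159.py | somaNPares
-- ===== SOURCE A (Python) =====
-- def somaNPares(x, n):
--     soma = 0
--     i = 0
--     while i < n:
--         if x % 2 == 0:
--             soma += x
--             i += 1
--         x += 1
--     return soma
-- ===== SOURCE B (Python) =====
-- def somaNPares(x, n):
--     # closed form: sum of the n consecutive even numbers starting at the first even >= x
--     if n <= 0:
--         return 0
--     first = x + x % 2
--     return first * n + n * (n - 1)
-- ===== Notes on version B (the rewrite author's own statement) =====
-- stated objective: faster
-- what changed: replaced the scanning while-loop over integers by the arithmetic-series closed form first_even*n + n*(n-1)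
import Mathlib
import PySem

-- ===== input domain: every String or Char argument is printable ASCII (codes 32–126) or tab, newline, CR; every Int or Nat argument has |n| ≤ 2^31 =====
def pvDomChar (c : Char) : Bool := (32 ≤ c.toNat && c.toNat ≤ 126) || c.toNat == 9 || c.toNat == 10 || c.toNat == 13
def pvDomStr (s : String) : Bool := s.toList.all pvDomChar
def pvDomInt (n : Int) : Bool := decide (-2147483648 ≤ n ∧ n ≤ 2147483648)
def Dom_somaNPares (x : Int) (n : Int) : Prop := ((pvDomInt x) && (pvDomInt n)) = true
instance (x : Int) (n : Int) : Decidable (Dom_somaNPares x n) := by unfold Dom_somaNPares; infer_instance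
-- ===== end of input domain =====

-- B replaces A's even-scanning while-loop by the O(1) arithmetic-series closed form (objective: faster).

-- ===== PORT A =====
-- literal port of A's while-loop; the Nat fuel is only a totality guard: 2*n+1 steps
-- always suffice (x advances every iteration, i advances whenever x is even), proved
-- in somaNParesLoop_closed below
def somaNParesLoop (fuel : Nat) (x : Int) (n : Int) (soma : Int) (i : Int) : Int :=
  match fuel with
  | 0 => soma
  | fuel + 1 =>
    if i < n then
      if PySem.Int.mod x 2 = 0 then
        somaNParesLoop fuel (x + 1) n (soma + x) (i + 1)
      else
        somaNParesLoop fuel (x + 1) n soma i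
    else soma

def somaNPares (x : Int) (n : Int) : Int :=
  somaNParesLoop (2 * n + 1).toNat x n 0 0

-- ===== PORT B =====
def somaNPares_alt (x : Int) (n : Int) : Int :=
  if n ≤ 0 then 0
  else
    (x + PySem.Int.mod x 2) * n + n * (n - 1)

-- ===== PRECONDITION & SPEC =====
def Spec_somaNPares (x : Int) (n : Int) (out : Int) : Prop := out = somaNPares_alt x n
instance (x : Int) (n : Int) (out : Int) : Decidable (Spec_somaNPares x n out) := by unfold Spec_somaNPares; infer_instance

-- ===== CLAIM (what is proved, stated in full; the proofs are below) =====
def Claim_equal_somaNPares : Prop := ∀ (x : Int) (n : Int), Dom_somaNPares x n → Spec_somaNPares x n (somaNPares x n)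

-- ===== LEMMAS AND PROOFS =====

theorem pymod2 (x : Int) : PySem.Int.mod x 2 = x % 2 :=
  PySem.Int.mod_eq_emod_of_pos (a := x) (b := 2) (by omega)

theorem somaNParesLoop_closed (fuel : Nat) (x n soma i : Int)
    (hf : (2 * (n - i) + PySem.Int.mod x 2).toNat ≤ fuel) :
    somaNParesLoop fuel x n soma i =
      soma + (if i < n then (x + PySem.Int.mod x 2) * (n - i) + (n - i) * (n - i - 1) else 0) := by
  induction fuel generalizing x soma i with
  | zero =>
    have := pymod2 x
    have hni : ¬ i < n := by omega
    simp [somaNParesLoop, hni]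
  | succ fuel ih =>
    by_cases h : i < n
    · have p0 := pymod2 x
      have p1 := pymod2 (x + 1)
      by_cases he : PySem.Int.mod x 2 = 0
      · have hx1 : PySem.Int.mod (x + 1) 2 = 1 := by omega
        rw [somaNParesLoop, if_pos h, if_pos he,
            ih (x + 1) (soma + x) (i + 1) (by omega)]
        by_cases h2 : i + 1 < n
        · simp only [if_pos h2, if_pos h, hx1, he]; ring
        · have hn : n = i + 1 := by omega
          subst hn
          simp only [if_neg h2, if_pos h, he]; ring
      · have hx0 : PySem.Int.mod x 2 = 1 := by omega
        have hx1 : PySem.Int.mod (x + 1) 2 = 0 := by omega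
        rw [somaNParesLoop, if_pos h, if_neg he,
            ih (x + 1) soma i (by omega)]
        simp only [if_pos h, hx0, hx1]; ring
    · simp [somaNParesLoop, h]

-- ===== VERDICT (by name: the statement is the Claim_ definition above) =====
theorem somaNPares_spec : Claim_equal_somaNPares := by
  intro x n _
  unfold Spec_somaNPares somaNPares somaNPares_alt
  rw [somaNParesLoop_closed _ _ _ _ _ (by have := pymod2 x; omega)]
  split_ifs with h1 h2 <;> first | omega | ring
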